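-- pv_equiv track=rewrite | github.com/INK-USC/CrossTaskMoE | utils.py | prune_ontology
-- ===== SOURCE A (Python) =====
-- def prune_ontology(tasks, ontology):
--     for k, v in ontology.items():
--         for k1, v1 in v.items():
--             v[k1] = sorted(filter(lambda x: x in tasks, v1))
--
--     count_dir = [(0, "None")]
--     count_subdir = [(0, "None")]
--     sorted_tasks = []
--
--     for k, v in ontology.items():
--         for k1, v1 in v.items():
--             count_subdir.append((count_subdir[-1][0] + len(v1), k1))
--             sorted_tasks += v1
--         count_dir.append((count_subdir[-1][0], k))
--
--     return ontology, sorted_tasks, count_dir, count_subdir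
-- ===== SOURCE B (Python) =====
-- def prune_ontology(tasks, ontology):
--     # Flatten-then-index design: prune in place against a set, flatten the
--     # ontology to one flat list of subdirs, compute a single flat prefix-sum
--     # table once, and derive count_subdir directly from it and count_dir by
--     # indexing the table at each directory's flat boundary (no nested
--     # counting loops, no count_subdir[-1] re-reads).
--     known = set(tasks)
--     for v in ontology.values():
--         for k1 in v:
--             v[k1] = sorted(x for x in v[k1] if x in known)
--     subs = [(k1, lst) for v in ontology.values() for k1, lst in v.items()]
--     sorted_tasks = [t for _, lst in subs for t in lst]
--     prefix = [0]
--     for _, lst in subs: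
--         prefix.append(prefix[-1] + len(lst))
--     count_subdir = [(0, "None")] + [(prefix[i + 1], subs[i][0])
--                                     for i in range(len(subs))]
--     count_dir = [(0, "None")]
--     b = 0
--     for k, v in ontology.items():
--         b += len(v)
--         count_dir.append((prefix[b], k))
--     return ontology, sorted_tasks, count_dir, count_subdir
-- ===== Notes on version B (the rewrite author's own statement) =====
-- stated objective: alternative
-- what changed: Replaces A's nested counting loops (which thread count_subdir/count_dir together, re-reading count_subdir[-1]) by flattening the ontology to one flat subdir list, computing a single flat prefix-sum table, and deriving count_subdir from that table and count_dir by indexing it at each directory's flat boundary; pruning tests membership in a set built once.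
import Mathlib
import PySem

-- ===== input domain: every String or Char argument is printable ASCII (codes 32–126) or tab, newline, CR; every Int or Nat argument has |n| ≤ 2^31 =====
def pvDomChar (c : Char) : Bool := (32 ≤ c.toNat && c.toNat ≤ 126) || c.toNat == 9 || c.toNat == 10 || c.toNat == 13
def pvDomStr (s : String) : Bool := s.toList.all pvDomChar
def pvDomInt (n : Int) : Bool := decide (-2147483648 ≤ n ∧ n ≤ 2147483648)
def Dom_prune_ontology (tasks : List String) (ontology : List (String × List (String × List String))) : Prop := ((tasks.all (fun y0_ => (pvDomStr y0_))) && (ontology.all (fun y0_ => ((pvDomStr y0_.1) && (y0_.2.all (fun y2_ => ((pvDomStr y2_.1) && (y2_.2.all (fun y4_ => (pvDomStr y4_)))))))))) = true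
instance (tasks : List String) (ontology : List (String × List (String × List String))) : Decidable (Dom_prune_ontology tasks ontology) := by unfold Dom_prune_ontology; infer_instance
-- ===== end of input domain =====

-- B replaces A's nested counting loops by flattening the ontology once, computing a single
-- flat prefix-sum table, and deriving both count tables from it (count_dir by indexing the
-- table at each directory's flat boundary); same return value, and both Pythons mutate
-- `ontology` in place identically.

-- ===== PORT A =====
-- sorted(filter(lambda x: x in tasks, v1))
def pvPrune (tasks : List String) (v1 : List String) : List String :=
  PySem.List.sorted (v1.filter (fun x => tasks.contains x)) (fun x => x) false

-- A's inner counting-loop body (second pass); state = (count_subdir, sorted_tasks)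
-- count_subdir[-1] : the list is never empty, so getLastD is exact
def pvASub (st1 : List (Int × String) × List String) (kv1 : String × List String) :
    List (Int × String) × List String :=
  (st1.1 ++ [((st1.1.getLastD ((0 : Int), "None")).1 + (kv1.2.length : Int), kv1.1)],
   st1.2 ++ kv1.2)

-- A's outer counting-loop body; state = (count_dir, count_subdir, sorted_tasks)
def pvADir (st : List (Int × String) × List (Int × String) × List String)
    (kv : String × List (String × List String)) :
    List (Int × String) × List (Int × String) × List String :=
  let inner := kv.2.foldl pvASub (st.2.1, st.2.2)
  (st.1 ++ [((inner.1.getLastD ((0 : Int), "None")).1, kv.1)], inner.1, inner.2)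

def prune_ontology (tasks : List String) (ontology : List (String × List (String × List String))) : (List (String × List (String × List String))) × List String × (List (Int × String)) × (List (Int × String)) :=
  -- first pass: prune every inner list in place
  let ontology1 := ontology.map (fun kv => (kv.1, kv.2.map (fun kv1 => (kv1.1, pvPrune tasks kv1.2))))
  -- second pass: build the count tables and flat task list
  let st := ontology1.foldl pvADir ([((0 : Int), "None")], [((0 : Int), "None")], [])
  (ontology1, st.2.2, st.1, st.2.1)

-- ===== PORT B =====
-- sorted(x for x in v1 if x in known)
def pvPruneB (known : PySem.Set String) (v1 : List String) : List String :=
  PySem.List.sorted (v1.filter (fun x => PySem.Set.contains known x)) (fun x => x) false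

def prune_ontology_alt (tasks : List String) (ontology : List (String × List (String × List String))) : (List (String × List (String × List String))) × List String × (List (Int × String)) × (List (Int × String)) :=
  let known : PySem.Set String := PySem.Set.ofList tasks
  -- in-place prune
  let o1 := ontology.map (fun kv => (kv.1, kv.2.map (fun kv1 => (kv1.1, pvPruneB known kv1.2))))
  -- flatten to one list of subdirs
  let subs := o1.flatMap (fun kv => kv.2)
  let sorted_tasks := subs.flatMap (fun s => s.2)
  -- flat prefix-sum table (prefix[-1]: the list is never empty, getLastD exact)
  let pfx := subs.foldl (fun p s => p ++ [p.getLastD 0 + (s.2.length : Int)]) [(0 : Int)]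
  -- prefix[i+1] / subs[i]: indices always in range, so getD is exact
  let count_subdir := (((0 : Int), "None")) ::
    (List.range subs.length).map (fun i => (pfx.getD (i + 1) 0, (subs.getD i ("", [])).1))
  -- count_dir: index the prefix table at each directory's flat boundary b (always in range)
  let cd := o1.foldl (fun st kv =>
      (st.1 ++ [(pfx.getD (st.2 + kv.2.length) 0, kv.1)], st.2 + kv.2.length))
    ([(((0 : Int), "None"))], 0)
  (o1, sorted_tasks, cd.1, count_subdir)

-- ===== PRECONDITION & SPEC =====
def Spec_prune_ontology (tasks : List String) (ontology : List (String × List (String × List String))) (out : (List (String × List (String × List String))) × List String × (List (Int × String)) × (List (Int × String))) : Prop := out = prune_ontology_alt tasks ontology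
instance (tasks : List String) (ontology : List (String × List (String × List String))) (out : (List (String × List (String × List String))) × List String × (List (Int × String)) × (List (Int × String))) : Decidable (Spec_prune_ontology tasks ontology out) := by unfold Spec_prune_ontology; infer_instance

-- ===== CLAIM =====
def Claim_equal_prune_ontology : Prop := ∀ (tasks : List String) (ontology : List (String × List (String × List String))), Dom_prune_ontology tasks ontology → Spec_prune_ontology tasks ontology (prune_ontology tasks ontology)

-- ===== LEMMAS AND PROOFS =====

-- total length (as Int) of the pruned lists of a flat subdir list
def pvLensL (v : List (String × List String)) : Int := (v.map (fun s => (s.2.length : Int))).sum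

-- running count_subdir entries starting from total t
def pvTab (t : Int) : List (String × List String) → List (Int × String)
  | [] => []
  | kv :: r => (t + (kv.2.length : Int), kv.1) :: pvTab (t + (kv.2.length : Int)) r

-- running prefix sums starting from total t (without the leading t)
def pvSums (t : Int) : List (String × List String) → List Int
  | [] => []
  | kv :: r => (t + (kv.2.length : Int)) :: pvSums (t + (kv.2.length : Int)) r

-- running count_dir entries starting from total t
def pvDirt (t : Int) : List (String × List (String × List String)) → List (Int × String)
  | [] => []
  | kv :: r => (t + pvLensL kv.2, kv.1) :: pvDirt (t + pvLensL kv.2) r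

-- count_dir entries as B computes them: look up the prefix table at flat boundaries
def pvDW (pfxl : List Int) : Nat → List (String × List (String × List String)) → List (Int × String)
  | _, [] => []
  | b, kv :: r => (pfxl.getD (b + kv.2.length) 0, kv.1) :: pvDW pfxl (b + kv.2.length) r

lemma pvPruneB_eq (tasks : List String) (v1 : List String) :
    pvPruneB (PySem.Set.ofList tasks) v1 = pvPrune tasks v1 := by
  unfold pvPruneB pvPrune
  congr 1
  apply List.filter_congr
  intro x _
  simp [PySem.Set.contains, PySem.Set.mem_ofList]

lemma pvTab_append (t : Int) (u v : List (String × List String)) :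
    pvTab t (u ++ v) = pvTab t u ++ pvTab (t + pvLensL u) v := by
  induction u generalizing t with
  | nil => simp [pvTab, pvLensL]
  | cons kv r ih => simp [pvTab, ih, pvLensL, add_assoc]

lemma last_pvTab (v : List (String × List String)) :
    ∀ (t : Int) (cs : List (Int × String)),
      (cs.getLastD ((0 : Int), "None")).1 = t →
      ((cs ++ pvTab t v).getLastD ((0 : Int), "None")).1 = t + pvLensL v := by
  induction v with
  | nil =>
    intro t cs h
    simp only [pvTab, List.append_nil]
    rw [h]; simp [pvLensL]
  | cons kv r ih =>
    intro t cs h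
    have := ih (t + (kv.2.length : Int)) (cs ++ [(t + (kv.2.length : Int), kv.1)]) (by simp)
    simp only [pvTab, pvLensL, List.map_cons, List.sum_cons] at *
    rw [show cs ++ (t + (kv.2.length : Int), kv.1) :: pvTab (t + (kv.2.length : Int)) r
        = (cs ++ [(t + (kv.2.length : Int), kv.1)]) ++ pvTab (t + (kv.2.length : Int)) r by simp]
    rw [this]; ring

lemma A_inner (v : List (String × List String)) :
    ∀ (cs : List (Int × String)) (ss : List String),
      v.foldl pvASub (cs, ss) =
        (cs ++ pvTab ((cs.getLastD ((0 : Int), "None")).1) v, ss ++ v.flatMap (fun s => s.2)) := by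
  induction v with
  | nil => intro cs ss; simp [pvTab]
  | cons kv r ih =>
    intro cs ss
    simp only [List.foldl_cons, pvASub]
    rw [ih]
    simp [pvTab, List.flatMap_cons]

lemma A_outer (o : List (String × List (String × List String))) :
    ∀ (cd cs : List (Int × String)) (ss : List String),
      o.foldl pvADir (cd, cs, ss) =
        (cd ++ pvDirt ((cs.getLastD ((0 : Int), "None")).1) o,
         cs ++ pvTab ((cs.getLastD ((0 : Int), "None")).1) (o.flatMap (fun kv => kv.2)),
         ss ++ (o.flatMap (fun kv => kv.2)).flatMap (fun s => s.2)) := by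
  induction o with
  | nil => intro cd cs ss; simp [pvDirt, pvTab]
  | cons kv r ih =>
    intro cd cs ss
    simp only [List.foldl_cons, pvADir, A_inner]
    rw [ih]
    have hlast : (((cs ++ pvTab ((cs.getLastD ((0 : Int), "None")).1) kv.2).getLastD
        ((0 : Int), "None")).1) = (cs.getLastD ((0 : Int), "None")).1 + pvLensL kv.2 :=
      last_pvTab kv.2 _ cs rfl
    rw [hlast]
    simp only [List.flatMap_cons, pvDirt, pvTab_append]
    simp

lemma pfx_char (v : List (String × List String)) :
    ∀ (t : Int) (p : List Int), p.getLastD 0 = t →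
      v.foldl (fun p s => p ++ [p.getLastD 0 + (s.2.length : Int)]) p = p ++ pvSums t v := by
  induction v with
  | nil => intro t p h; simp [pvSums]
  | cons kv r ih =>
    intro t p h
    simp only [List.foldl_cons, h]
    rw [ih (t + (kv.2.length : Int)) _ (by simp)]
    simp [pvSums]

lemma pvSums_getD (v : List (String × List String)) :
    ∀ (t : Int) (b : Nat), b < v.length →
      (pvSums t v).getD b 0 = t + pvLensL (v.take (b + 1)) := by
  induction v with
  | nil => intro t b h; simp at h
  | cons kv r ih =>
    intro t b h
    cases b with
    | zero => simp [pvSums, pvLensL]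
    | succ b' =>
      simp only [pvSums, List.getD_cons_succ]
      rw [ih (t + (kv.2.length : Int)) b' (by simpa using h)]
      simp [pvLensL, add_assoc]

lemma pfx_getD (v : List (String × List String)) (b : Nat) (hb : b ≤ v.length) :
    ((0 : Int) :: pvSums 0 v).getD b 0 = pvLensL (v.take b) := by
  cases b with
  | zero => simp [pvLensL]
  | succ b' =>
    simp only [List.getD_cons_succ]
    rw [pvSums_getD v 0 b' (by omega)]
    simp

lemma range_map_tab (v : List (String × List String)) :
    ∀ (t : Int),
      (List.range v.length).map
          (fun i => (t + pvLensL (v.take (i + 1)), (v.getD i ("", [])).1)) = pvTab t v := by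
  induction v with
  | nil => intro t; simp [pvTab]
  | cons kv r ih =>
    intro t
    rw [List.length_cons, List.range_succ_eq_map, List.map_cons, List.map_map, pvTab]
    have h5 : ∀ i ∈ List.range r.length,
        ((fun i => (t + pvLensL (List.take (i + 1) (kv :: r)), ((kv :: r).getD i ("", [])).1)) ∘
          Nat.succ) i =
        (fun i => ((t + (kv.2.length : Int)) + pvLensL (List.take (i + 1) r),
          (r.getD i ("", [])).1)) i := by
      intro i _
      simp [pvLensL, List.take_succ_cons, add_assoc]
    rw [List.map_congr_left h5, ih (t + (kv.2.length : Int))]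
    simp [pvLensL]

lemma Bdir_char (pfxl : List Int) (o : List (String × List (String × List String))) :
    ∀ (cd : List (Int × String)) (b : Nat),
      o.foldl (fun st kv =>
          (st.1 ++ [(pfxl.getD (st.2 + kv.2.length) 0, kv.1)], st.2 + kv.2.length)) (cd, b) =
        (cd ++ pvDW pfxl b o, b + (o.map (fun kv => kv.2.length)).sum) := by
  induction o with
  | nil => intro cd b; simp [pvDW]
  | cons kv r ih =>
    intro cd b
    simp only [List.foldl_cons]
    rw [ih]
    simp [pvDW, add_assoc]

lemma pvLensL_append (u v : List (String × List String)) :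
    pvLensL (u ++ v) = pvLensL u + pvLensL v := by
  simp [pvLensL]

lemma pvDW_eq_dirt (o : List (String × List (String × List String))) :
    ∀ (u : List (String × List String)),
      pvDW ((0 : Int) :: pvSums 0 (u ++ o.flatMap (fun kv => kv.2))) u.length o =
        pvDirt (pvLensL u) o := by
  induction o with
  | nil => intro u; simp [pvDW, pvDirt]
  | cons kv r ih =>
    intro u
    simp only [pvDW, pvDirt, List.flatMap_cons]
    congr 1
    · congr 1
      have hb : u.length + kv.2.length = (u ++ kv.2).length := by simp
      have hv : u ++ (kv.2 ++ r.flatMap (fun kv => kv.2)) =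
          (u ++ kv.2) ++ r.flatMap (fun kv => kv.2) := by simp
      rw [hv, hb, pfx_getD _ _ (by simp)]
      rw [List.take_left]
      simp [pvLensL]
    · have h6 := ih (u ++ kv.2)
      simpa [pvLensL_append] using h6

-- ===== VERDICT =====
theorem prune_ontology_spec : Claim_equal_prune_ontology := by
  intro tasks ontology _
  unfold Spec_prune_ontology prune_ontology prune_ontology_alt
  simp only [pvPruneB_eq]
  rw [A_outer]
  set P := ontology.map (fun kv => (kv.1, kv.2.map (fun kv1 => (kv1.1, pvPrune tasks kv1.2)))) with hP
  set F := P.flatMap (fun kv => kv.2) with hF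
  rw [pfx_char F 0 [(0 : Int)] rfl]
  rw [Bdir_char]
  have h1 : ([(0 : Int)] ++ pvSums 0 F : List Int) = (0 : Int) :: pvSums 0 F := by simp
  rw [h1]
  have h2 := pvDW_eq_dirt P ([] : List (String × List String))
  simp only [List.nil_append, List.length_nil] at h2
  rw [← hF] at h2
  rw [h2]
  have h3 : pvLensL ([] : List (String × List String)) = 0 := by simp [pvLensL]
  rw [h3]
  have h4 : (List.range F.length).map
      (fun i => (((0 : Int) :: pvSums 0 F).getD (i + 1) 0, (F.getD i ("", [])).1)) = pvTab 0 F := by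
    rw [← range_map_tab F 0]
    apply List.map_congr_left
    intro i hi
    rw [List.mem_range] at hi
    have := pfx_getD F (i + 1) (by omega)
    rw [List.getD_cons_succ] at this ⊢
    rw [this]
    simp
  rw [h4]
  simp
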